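-- pv_equiv track=rewrite | github.com/AMalkov07/teloTracker_snakemake | scripts/plot_switch_distances_spacer_and_x_ends_all_ends.py | calculate_index_of_switch
-- ===== SOURCE A (Python) =====
-- def calculate_index_of_switch(chr_end_matching_order_list, anchored_chr_end):
--
--       conservate_switch_index = 0
--       aggressive_switch_index = 0
--
--       score = 0
--       max_score = 0
--       first_switch = True
--       for i, matching_chr_end in enumerate(chr_end_matching_order_list):
--             if matching_chr_end != anchored_chr_end:
--                   if i == 0:
--                         switch_to_chr_end = matching_chr_end
--
--                   score += 1
--                   if score >= max_score:
--                         aggressive_switch_index = i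
--             else:
--                   if i == 0:
--                         conservate_switch_index = 0
--                         aggressive_switch_index = 0
--                         switch_to_chr_end = anchored_chr_end
--                         break
--
--                   else:
--                         score -= 1
--
--                         if first_switch == True:
--                               first_switch = False
--                               conservate_switch_index = i
--
--       return switch_to_chr_end, conservate_switch_index, aggressive_switch_index
-- ===== SOURCE B (Python) =====
-- def calculate_index_of_switch(chr_end_matching_order_list, anchored_chr_end):
--       switch_to_chr_end = chr_end_matching_order_list[0]
--       if switch_to_chr_end == anchored_chr_end:
--             return anchored_chr_end, 0, 0
--
--       # prefix scores: +1 for a mismatch, -1 for a match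
--       scores = []
--       s = 0
--       for x in chr_end_matching_order_list:
--             s += 1 if x != anchored_chr_end else -1
--             scores.append(s)
--
--       # aggressive: last index holding a mismatch whose prefix score is >= 0
--       aggressive_switch_index = 0
--       for i, (x, sc) in enumerate(zip(chr_end_matching_order_list, scores)):
--             if x != anchored_chr_end and sc >= 0:
--                   aggressive_switch_index = i
--
--       # conservative: first index > 0 whose element equals the anchor
--       conservate_switch_index = 0
--       for i, x in enumerate(chr_end_matching_order_list):
--             if i > 0 and x == anchored_chr_end:
--                   conservate_switch_index = i
--                   break
--
--       return switch_to_chr_end, conservate_switch_index, aggressive_switch_index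
-- ===== Notes on version B (the rewrite author's own statement) =====
-- stated objective: alternative
-- what changed: Replaces A's single fused loop with mutable score/first_switch/break state by a table-building pass (prefix mismatch scores) plus two independent derived scans (last mismatch index with score >= 0; first later index equal to the anchor), with a guarded first-element short-circuit.
-- outside the precondition, e.g. on calculate_index_of_switch([], 'a'): A raises UnboundLocalError, B raises IndexError
import Mathlib
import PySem

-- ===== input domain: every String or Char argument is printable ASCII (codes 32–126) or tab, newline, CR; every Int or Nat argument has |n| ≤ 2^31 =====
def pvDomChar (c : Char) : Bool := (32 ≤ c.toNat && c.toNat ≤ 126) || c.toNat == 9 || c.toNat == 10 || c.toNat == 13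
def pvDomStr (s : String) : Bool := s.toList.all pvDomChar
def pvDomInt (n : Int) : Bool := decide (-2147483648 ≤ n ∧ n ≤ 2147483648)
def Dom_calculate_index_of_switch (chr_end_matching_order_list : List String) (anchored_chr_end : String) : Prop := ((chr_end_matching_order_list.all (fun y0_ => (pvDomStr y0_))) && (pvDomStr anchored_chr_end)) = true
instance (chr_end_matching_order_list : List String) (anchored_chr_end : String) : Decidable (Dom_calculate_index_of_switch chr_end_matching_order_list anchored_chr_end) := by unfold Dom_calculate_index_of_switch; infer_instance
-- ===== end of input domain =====

-- B replaces A's fused accumulation loop by a prefix-score table plus two independent derived scans (alternative decomposition, same cost).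


-- ===== PORT A =====
-- A's for-loop over enumerate, state (cons, aggr, score, max_score, first_switch, switch_to);
-- switch_to is Option String (unassigned = none, Python's UnboundLocalError); break at i = 0 returns early.
def pvLoopA (anch : String) : List String → Nat → Int → Int → Int → Int → Bool → Option String → Option String × Int × Int
  | [], _, cons, aggr, _, _, _, sw => (sw, cons, aggr)
  | x :: rest, i, cons, aggr, score, maxScore, first, sw =>
    if x ≠ anch then
      let sw := if i = 0 then some x else sw
      let score := score + 1
      let aggr := if score ≥ maxScore then (i : Int) else aggr
      pvLoopA anch rest (i + 1) cons aggr score maxScore first sw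
    else
      if i = 0 then (some anch, 0, 0)
      else
        let score := score - 1
        let (cons, first) := if first then ((i : Int), false) else (cons, first)
        pvLoopA anch rest (i + 1) cons aggr score maxScore first sw

def calculate_index_of_switch (chr_end_matching_order_list : List String) (anchored_chr_end : String) : String × Int × Int :=
  let r := pvLoopA anchored_chr_end chr_end_matching_order_list 0 0 0 0 0 true none
  (r.1.getD "", r.2.1, r.2.2)  -- none never occurs under Pre_ (nonempty list); Python raises there

-- ===== PORT B =====
-- prefix scores: +1 for a mismatch, -1 for a match (Source B's first loop)
def pvBuildScores (anch : String) (s : Int) : List String → List Int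
  | [] => []
  | x :: r =>
    let s' := s + (if x ≠ anch then 1 else -1)
    s' :: pvBuildScores anch s' r

-- last index with a mismatch and score >= 0 (Source B's enumerate(zip(..)) loop, counter k)
def pvAggrLoop (anch : String) : Nat → List (String × Int) → Int → Int
  | _, [], a => a
  | k, (x, sc) :: r, a => pvAggrLoop anch (k + 1) r (if x ≠ anch ∧ sc ≥ 0 then (k : Int) else a)

-- first index > 0 equal to the anchor, default 0 (Source B's last loop with break)
def pvConsLoop (anch : String) : Nat → List String → Int
  | _, [] => 0
  | k, x :: r => if 0 < k ∧ x = anch then (k : Int) else pvConsLoop anch (k + 1) r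

def calculate_index_of_switch_alt (chr_end_matching_order_list : List String) (anchored_chr_end : String) : String × Int × Int :=
  match chr_end_matching_order_list with
  | [] => ("", 0, 0)  -- Source B raises IndexError on []; outside Pre_
  | x0 :: _ =>
    if x0 = anchored_chr_end then (anchored_chr_end, 0, 0)
    else
      (x0,
       pvConsLoop anchored_chr_end 0 chr_end_matching_order_list,
       pvAggrLoop anchored_chr_end 0
         (chr_end_matching_order_list.zip (pvBuildScores anchored_chr_end 0 chr_end_matching_order_list)) 0)

-- ===== PRECONDITION & SPEC =====
-- Pre_ excludes only the empty list, on which A raises UnboundLocalError (switch_to_chr_end never assigned).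
def Pre_calculate_index_of_switch (chr_end_matching_order_list : List String) (anchored_chr_end : String) : Prop :=
  chr_end_matching_order_list ≠ []
instance (chr_end_matching_order_list : List String) (anchored_chr_end : String) : Decidable (Pre_calculate_index_of_switch chr_end_matching_order_list anchored_chr_end) := by unfold Pre_calculate_index_of_switch; infer_instance
def pvWitness_calculate_index_of_switch : List String × String := (["chr1L", "chr2R", "chr1L"], "chr1L")

def Spec_calculate_index_of_switch (chr_end_matching_order_list : List String) (anchored_chr_end : String) (out : String × Int × Int) : Prop := out = calculate_index_of_switch_alt chr_end_matching_order_list anchored_chr_end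
instance (chr_end_matching_order_list : List String) (anchored_chr_end : String) (out : String × Int × Int) : Decidable (Spec_calculate_index_of_switch chr_end_matching_order_list anchored_chr_end out) := by unfold Spec_calculate_index_of_switch; infer_instance

-- ===== CLAIM (what is proved, stated in full; the proofs are below) =====
def Claim_equal_calculate_index_of_switch : Prop := ∀ (chr_end_matching_order_list : List String) (anchored_chr_end : String), Dom_calculate_index_of_switch chr_end_matching_order_list anchored_chr_end → Pre_calculate_index_of_switch chr_end_matching_order_list anchored_chr_end → Spec_calculate_index_of_switch chr_end_matching_order_list anchored_chr_end (calculate_index_of_switch chr_end_matching_order_list anchored_chr_end)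

-- ===== LEMMAS AND PROOFS =====

-- A's loop from index i ≥ 1 (so the break branch is unreachable) equals B's two derived scans.
theorem pvLoopA_eq (anch : String) :
    ∀ (rest : List String) (i : Nat) (cons aggr score : Int) (first : Bool) (sw : Option String),
      0 < i → (first = true → cons = 0) →
      pvLoopA anch rest i cons aggr score 0 first sw =
        (sw,
         (if first then pvConsLoop anch i rest else cons),
         pvAggrLoop anch i (rest.zip (pvBuildScores anch score rest)) aggr) := by
  intro rest
  induction rest with
  | nil =>
    intro i cons aggr score first sw hi hc
    cases first with
    | false => simp [pvLoopA, pvAggrLoop, pvConsLoop, pvBuildScores]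
    | true => simp [pvLoopA, pvAggrLoop, pvConsLoop, pvBuildScores, hc rfl]
  | cons x r ih =>
    intro i cons aggr score first sw hi hc
    by_cases hx : x = anch
    · -- match branch: i ≠ 0, score decreases, cons/first update
      have hi0 : ¬ i = 0 := by omega
      cases first with
      | true =>
        rw [show pvLoopA anch (x :: r) i cons aggr score 0 true sw
              = pvLoopA anch r (i + 1) (i : Int) aggr (score - 1) 0 false sw by
            simp [pvLoopA, hx, hi0]]
        rw [ih (i + 1) (i : Int) aggr (score - 1) false sw (by omega) (by simp)]
        simp [pvConsLoop, pvAggrLoop, pvBuildScores, hx, hi, sub_eq_add_neg]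
      | false =>
        rw [show pvLoopA anch (x :: r) i cons aggr score 0 false sw
              = pvLoopA anch r (i + 1) cons aggr (score - 1) 0 false sw by
            simp [pvLoopA, hx, hi0]]
        rw [ih (i + 1) cons aggr (score - 1) false sw (by omega) (by simp)]
        simp [pvAggrLoop, pvBuildScores, hx, sub_eq_add_neg]
    · -- mismatch branch: score increases, aggr update
      have hi0 : ¬ i = 0 := by omega
      rw [show pvLoopA anch (x :: r) i cons aggr score 0 first sw
            = pvLoopA anch r (i + 1) cons (if score + 1 ≥ 0 then (i : Int) else aggr) (score + 1) 0 first sw by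
          simp [pvLoopA, hx, hi0]]
      rw [ih (i + 1) cons _ (score + 1) first sw (by omega) hc]
      simp [pvConsLoop, pvAggrLoop, pvBuildScores, hx]

-- ===== VERDICT (by name: the statement is the Claim_ definition above) =====
theorem calculate_index_of_switch_spec : Claim_equal_calculate_index_of_switch := by
  intro lst anch _ hpre
  unfold Spec_calculate_index_of_switch
  match lst with
  | [] => exact absurd rfl hpre
  | x0 :: rest =>
    by_cases hx : x0 = anch
    · simp [calculate_index_of_switch, calculate_index_of_switch_alt, pvLoopA, hx]
    · rw [show calculate_index_of_switch (x0 :: rest) anch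
            = (let r := pvLoopA anch rest 1 0 0 1 0 true (some x0); (r.1.getD "", r.2.1, r.2.2)) by
          simp [calculate_index_of_switch, pvLoopA, hx]]
      rw [pvLoopA_eq anch rest 1 0 0 1 true (some x0) (by omega) (fun _ => rfl)]
      simp [calculate_index_of_switch_alt, pvConsLoop, pvAggrLoop, pvBuildScores, hx]
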